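-- pv_equiv track=rewrite | github.com/ChrisBadolato/Python | Python/pythonAssignmentCB.py | base_builder
-- ===== SOURCE A (Python) =====
-- def base_builder(inputValue):
--  quaternary = recursiveFunction(inputValue)
--  total = 0
--  qValue = quaternary
--  while(qValue > 0):
--     total = total + qValue%10
--     qValue = qValue//10
--  return(total,quaternary)
--
-- def recursiveFunction(inputValue):
--  if inputValue == 0: return 0
--  else: return(inputValue % 4 + 10 * recursiveFunction(inputValue//4))
-- ===== SOURCE B (Python) =====
-- def base_builder(inputValue):
--     # One fused recursion over the base-4 digits: returns (digit_sum, quaternary).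
--     if inputValue == 0:
--         return (0, 0)
--     total, q = base_builder(inputValue // 4)
--     d = inputValue % 4
--     return (total + d, d + 10 * q)
-- ===== Notes on version B (the rewrite author's own statement) =====
-- stated objective: simpler
-- what changed: Fuses A's build-the-quaternary recursion plus separate decimal-digit-sum while loop into one recursion that returns the (digit sum, quaternary) pair directly.
import Mathlib
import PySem

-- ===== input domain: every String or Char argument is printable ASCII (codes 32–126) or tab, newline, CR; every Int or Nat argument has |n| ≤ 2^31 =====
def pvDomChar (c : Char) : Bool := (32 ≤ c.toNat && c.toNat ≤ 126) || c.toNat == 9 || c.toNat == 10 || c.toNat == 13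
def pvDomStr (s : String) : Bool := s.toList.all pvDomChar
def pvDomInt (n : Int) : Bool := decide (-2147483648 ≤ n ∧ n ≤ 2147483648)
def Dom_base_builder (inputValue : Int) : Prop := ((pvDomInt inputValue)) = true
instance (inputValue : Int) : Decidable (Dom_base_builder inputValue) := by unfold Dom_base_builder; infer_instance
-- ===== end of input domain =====

-- B fuses A's build-the-quaternary recursion and its separate decimal digit-sum
-- while loop into one recursion returning the (digit sum, quaternary) pair.


-- ===== PORT A =====
-- recursiveFunction; the 'inputValue < 0' branch only totalizes the port
-- (Python recurses forever / raises RecursionError there; excluded by Pre_).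
def recursiveFunction (inputValue : Int) : Int :=
  if inputValue = 0 then 0
  else if inputValue < 0 then 0
  else PySem.Int.mod inputValue 4 + 10 * recursiveFunction (PySem.Int.floordiv inputValue 4)
termination_by inputValue.toNat
decreasing_by
  have h1 : 0 < inputValue := by omega
  simp only [PySem.Int.floordiv]
  rw [Int.fdiv_eq_ediv_of_nonneg _ (by omega)]
  omega

-- the while loop of base_builder: sums the decimal digits of qValue
def digitSumLoop (total qValue : Int) : Int :=
  if qValue > 0 then
    digitSumLoop (total + PySem.Int.mod qValue 10) (PySem.Int.floordiv qValue 10)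
  else total
termination_by qValue.toNat
decreasing_by
  simp only [PySem.Int.floordiv]
  rw [Int.fdiv_eq_ediv_of_nonneg _ (by omega)]
  omega

def base_builder (inputValue : Int) : Int × Int :=
  let quaternary := recursiveFunction inputValue
  let total := digitSumLoop 0 quaternary
  (total, quaternary)

-- ===== PORT B =====
-- 'inputValue < 0' branch only totalizes the port (B's Python also raises there).
def base_builder_alt (inputValue : Int) : Int × Int :=
  if inputValue = 0 then (0, 0)
  else if inputValue < 0 then (0, 0)
  else
    let p := base_builder_alt (PySem.Int.floordiv inputValue 4)
    let d := PySem.Int.mod inputValue 4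
    (p.1 + d, d + 10 * p.2)
termination_by inputValue.toNat
decreasing_by
  have h1 : 0 < inputValue := by omega
  simp only [PySem.Int.floordiv]
  rw [Int.fdiv_eq_ediv_of_nonneg _ (by omega)]
  omega

-- ===== PRECONDITION & SPEC =====
-- Pre_ excludes negative inputs: there A's recursiveFunction (and B) recurse
-- without reaching the base case and Python raises RecursionError.
def Pre_base_builder (inputValue : Int) : Prop := 0 ≤ inputValue
instance (inputValue : Int) : Decidable (Pre_base_builder inputValue) := by unfold Pre_base_builder; infer_instance
def pvWitness_base_builder : Int := (21)

def Spec_base_builder (inputValue : Int) (out : Int × Int) : Prop := out = base_builder_alt inputValue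
instance (inputValue : Int) (out : Int × Int) : Decidable (Spec_base_builder inputValue out) := by unfold Spec_base_builder; infer_instance

-- ===== CLAIM (what is proved, stated in full; the proofs are below) =====
def Claim_equal_base_builder : Prop := ∀ (inputValue : Int), Dom_base_builder inputValue → Pre_base_builder inputValue → Spec_base_builder inputValue (base_builder inputValue)

-- ===== LEMMAS AND PROOFS =====

theorem recursiveFunction_nonneg (n : Int) (hn : 0 ≤ n) : 0 ≤ recursiveFunction n := by
  by_cases h1 : n = 0
  · subst h1; simp [recursiveFunction]
  · have h2 : ¬ n < 0 := by omega
    rw [recursiveFunction, if_neg h1, if_neg h2]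
    have hm : 0 ≤ PySem.Int.mod n 4 := by
      simp [PySem.Int.mod]; rw [Int.fmod_eq_emod_of_nonneg _ (by omega)]; omega
    have hd : 0 ≤ PySem.Int.floordiv n 4 := by
      simp [PySem.Int.floordiv]; rw [Int.fdiv_eq_ediv_of_nonneg _ (by omega)]; omega
    have := recursiveFunction_nonneg (PySem.Int.floordiv n 4) hd
    omega
termination_by n.toNat
decreasing_by
  simp only [PySem.Int.floordiv]
  rw [Int.fdiv_eq_ediv_of_nonneg _ (by omega)]
  omega

-- peeling one decimal digit off the loop argument, for a digit 0 ≤ d < 10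
theorem digitSumLoop_step (total d q : Int) (hd0 : 0 ≤ d) (hd : d < 10) (hq : 0 ≤ q) :
    digitSumLoop total (d + 10 * q) = digitSumLoop (total + d) q := by
  by_cases hz : d + 10 * q > 0
  · have hm : PySem.Int.mod (d + 10 * q) 10 = d := by
      simp [PySem.Int.mod]; rw [Int.fmod_eq_emod_of_nonneg _ (by omega)]; omega
    have hfd : PySem.Int.floordiv (d + 10 * q) 10 = q := by
      simp [PySem.Int.floordiv]; rw [Int.fdiv_eq_ediv_of_nonneg _ (by omega)]; omega
    conv_lhs => rw [digitSumLoop]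
    rw [if_pos hz, hm, hfd]
  · have hd' : d = 0 := by omega
    have hq' : q = 0 := by omega
    subst hd'; subst hq'
    norm_num

theorem digitSumLoop_shift (q : Int) : ∀ total : Int, digitSumLoop total q = total + digitSumLoop 0 q := by
  intro total
  by_cases h : q > 0
  · conv_lhs => rw [digitSumLoop]
    conv_rhs => rw [digitSumLoop]
    rw [if_pos h, if_pos h]
    rw [digitSumLoop_shift (PySem.Int.floordiv q 10) (total + PySem.Int.mod q 10),
        digitSumLoop_shift (PySem.Int.floordiv q 10) (0 + PySem.Int.mod q 10)]
    ring
  · conv_lhs => rw [digitSumLoop]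
    conv_rhs => rw [digitSumLoop]
    rw [if_neg h, if_neg h]
    ring
termination_by q.toNat
decreasing_by
  all_goals simp only [PySem.Int.floordiv,
    Int.fdiv_eq_ediv_of_nonneg _ (by omega : (0:Int) ≤ 10)]
  all_goals omega

-- main invariant: B computes (digit sum of quaternary, quaternary)
theorem alt_eq (n : Int) (hn : 0 ≤ n) :
    base_builder_alt n = (digitSumLoop 0 (recursiveFunction n), recursiveFunction n) := by
  by_cases h1 : n = 0
  · subst h1
    rw [base_builder_alt, recursiveFunction]
    simp [digitSumLoop]
  · have h2 : ¬ n < 0 := by omega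
    have hfd : 0 ≤ PySem.Int.floordiv n 4 := by
      simp [PySem.Int.floordiv]; rw [Int.fdiv_eq_ediv_of_nonneg _ (by omega)]; omega
    have hd0 : 0 ≤ PySem.Int.mod n 4 := by
      simp [PySem.Int.mod]; rw [Int.fmod_eq_emod_of_nonneg _ (by omega)]; omega
    have hd : PySem.Int.mod n 4 < 10 := by
      simp [PySem.Int.mod]; rw [Int.fmod_eq_emod_of_nonneg _ (by omega)]; omega
    have hq := recursiveFunction_nonneg _ hfd
    rw [base_builder_alt, if_neg h1, if_neg h2]
    conv_rhs => rw [recursiveFunction]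
    rw [if_neg h1, if_neg h2]
    rw [alt_eq (PySem.Int.floordiv n 4) hfd]
    simp only
    rw [digitSumLoop_step 0 _ _ hd0 hd hq, digitSumLoop_shift (recursiveFunction (PySem.Int.floordiv n 4)) (0 + PySem.Int.mod n 4)]
    rw [Prod.mk.injEq]; exact ⟨by ring, rfl⟩
termination_by n.toNat
decreasing_by
  simp only [PySem.Int.floordiv]
  rw [Int.fdiv_eq_ediv_of_nonneg _ (by omega)]
  omega

-- ===== VERDICT (by name: the statement is the Claim_ definition above) =====
theorem base_builder_spec : Claim_equal_base_builder := by
  intro n _ hpre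
  unfold Spec_base_builder base_builder
  rw [alt_eq n hpre]
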